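-- pv_equiv track=rewrite | github.com/ivanychev/learning | Python/something/morse.py | labelUniqueListObjects
-- ===== SOURCE A (Python) =====
-- def labelUniqueListObjects(l):
--     counter = None
--     if len(l) == 0:
--         return []
--     ret = []
--     for idx, val in enumerate(l):
--         if counter is None:
--             counter = 0
--             ret.append(counter)
--             continue
--         if val in l[:idx]:
--             ret.append(ret[l[:idx].index(val)])
--         else:
--             counter += 1
--             ret.append(counter)
--     return ret
-- ===== SOURCE B (Python) =====
-- def labelUniqueListObjects(l):
--     first = {}
--     for i, v in enumerate(l):
--         if v not in first:
--             first[v] = i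
--     rank = {idx: r for r, idx in enumerate(sorted(first.values()))}
--     return [rank[first[v]] for v in l]
-- ===== Notes on version B (the rewrite author's own statement) =====
-- stated objective: faster
-- what changed: Replaces A's single pass that re-copies, re-scans and re-indexes the prefix l[:idx] at every element with a three-stage coordinate compression: one pass records each value's first-occurrence position in a dict, the distinct positions are ranked by sorting them, and a final map sends every element to the rank of its first occurrence.
import Mathlib
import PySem

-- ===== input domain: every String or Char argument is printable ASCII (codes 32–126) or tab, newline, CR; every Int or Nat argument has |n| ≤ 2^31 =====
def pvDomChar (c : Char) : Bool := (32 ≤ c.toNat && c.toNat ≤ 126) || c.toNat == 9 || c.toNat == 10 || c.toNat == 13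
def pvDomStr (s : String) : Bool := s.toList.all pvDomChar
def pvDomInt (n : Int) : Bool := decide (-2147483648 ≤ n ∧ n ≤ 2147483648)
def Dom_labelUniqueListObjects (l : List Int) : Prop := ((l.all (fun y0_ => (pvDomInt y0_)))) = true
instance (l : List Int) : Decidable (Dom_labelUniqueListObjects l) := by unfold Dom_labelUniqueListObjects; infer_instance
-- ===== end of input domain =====

-- B replaces A's single pass with its inline prefix re-scan (l[:idx] copied, searched and
-- re-indexed at every element) by coordinate compression: record each value's
-- first-occurrence position, rank the distinct positions by sorting, and map each
-- element to the rank of its first occurrence.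

-- ===== PORT A =====
-- the for-loop of A, as structural recursion over the remaining elements with the
-- same state (idx, counter, ret); `l` stays the full list, used for the slice l[:idx]
def pvAGo (l : List Int) (rest : List Int) (idx : Int) (counter : Option Int)
    (ret : List Int) : List Int :=
  match rest with
  | [] => ret
  | val :: rest' =>
    match counter with
    | none => pvAGo l rest' (idx + 1) (some 0) (ret ++ [0])
    | some c =>
      let pref := PySem.List.slice l none (some idx)   -- l[:idx]
      if pref.contains val then
        -- ret.append(ret[l[:idx].index(val)]) — the index is always in range here
        pvAGo l rest' (idx + 1) (some c)
          (ret ++ [(PySem.List.pyGet? ret (((PySem.List.index? pref val).getD 0 : Nat) : Int)).getD 0])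
      else
        pvAGo l rest' (idx + 1) (some (c + 1)) (ret ++ [c + 1])

def labelUniqueListObjects (l : List Int) : List Int :=
  if l.length == 0 then [] else pvAGo l l 0 none []

-- ===== PORT B =====
-- pass 1: first[v] = first-occurrence index of v (insert only when not yet a key);
-- pass 2: rank = {idx: r for r, idx in enumerate(sorted(first.values()))};
-- pass 3: [rank[first[v]] for v in l] — both keys always present, so the lookups
-- use .getD 0 only to make the port total (Python never takes the default here)
def labelUniqueListObjects_alt (l : List Int) : List Int :=
  let first := (PySem.List.enumerate l 0).foldl
    (fun (d : PySem.Dict Int Int) p =>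
      if d.contains p.2 then d else d.insert p.2 p.1)
    PySem.Dict.empty
  let rank := (PySem.List.enumerate (PySem.List.sorted first.values (fun x => x) false) 0).foldl
    (fun (d : PySem.Dict Int Int) p => d.insert p.2 p.1)
    PySem.Dict.empty
  l.map (fun v => (rank.get? ((first.get? v).getD 0)).getD 0)

-- ===== PRECONDITION & SPEC =====
def Spec_labelUniqueListObjects (l : List Int) (out : List Int) : Prop := out = labelUniqueListObjects_alt l
instance (l : List Int) (out : List Int) : Decidable (Spec_labelUniqueListObjects l out) := by unfold Spec_labelUniqueListObjects; infer_instance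

-- ===== CLAIM (what is proved, stated in full; the proofs are below) =====
def Claim_equal_labelUniqueListObjects : Prop := ∀ (l : List Int), Dom_labelUniqueListObjects l → Spec_labelUniqueListObjects l (labelUniqueListObjects l)

-- ===== LEMMAS AND PROOFS =====

-- the label of v relative to a seen-list s: position of its first occurrence
def pvRank (s : List Int) (v : Int) : Int := (((PySem.List.index? s v).getD 0 : Nat) : Int)

theorem pvOfList_append_singleton_mem {p : List Int} {v : Int} (h : v ∈ p) :
    PySem.Set.ofList (p ++ [v]) = PySem.Set.ofList p := by
  rw [PySem.Set.ofList_eq_foldl, List.foldl_append, ← PySem.Set.ofList_eq_foldl]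
  simp [PySem.Set.add, PySem.Set.contains_eq_listContains]
  exact h

theorem pvOfList_append_singleton_not_mem {p : List Int} {v : Int} (h : v ∉ p) :
    PySem.Set.ofList (p ++ [v]) = PySem.Set.ofList p ++ [v] := by
  rw [PySem.Set.ofList_eq_foldl, List.foldl_append, ← PySem.Set.ofList_eq_foldl]
  simp [PySem.Set.add, PySem.Set.contains_eq_listContains]
  intro hv
  exact h hv

theorem pvRank_append_of_mem {s : List Int} (t : List Int) {v : Int} (h : v ∈ s) :
    pvRank (s ++ t) v = pvRank s v := by
  unfold pvRank
  rw [PySem.List.index?_append_of_mem _ h]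

theorem pvRank_lt_length {s : List Int} {v : Int} (h : v ∈ s) :
    pvRank s v < (s.length : Int) := by
  obtain ⟨k, hk⟩ := Option.isSome_iff_exists.mp ((PySem.List.index?_isSome_iff s v).2 h)
  obtain ⟨hklt, -, -⟩ := PySem.List.getElem_of_index?_eq_some hk
  unfold pvRank
  rw [hk]
  simpa using hklt

-- A's main invariant: from a nonempty processed prefix p, the loop computes the labels of p ++ rest
theorem pvAGo_invariant (rest : List Int) : ∀ (p : List Int), p ≠ [] →
    pvAGo (p ++ rest) rest (p.length : Int) (some ((PySem.Set.ofList p).length - 1))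
      (p.map (pvRank (PySem.Set.ofList p)))
    = (p ++ rest).map (pvRank (PySem.Set.ofList (p ++ rest))) := by
  induction rest with
  | nil => intro p _; simp [pvAGo]
  | cons val rest' ih =>
    intro p hp
    have hsplit : p ++ val :: rest' = (p ++ [val]) ++ rest' := by simp
    rw [pvAGo]
    have hpref : PySem.List.slice (p ++ val :: rest') none (some (p.length : Int)) = p := by
      rw [PySem.List.slice_to_natCast]
      simp
    rw [hpref]
    by_cases hmem : val ∈ p
    · -- duplicate: look up the label of the first occurrence
      simp only [List.contains_eq_mem, hmem, decide_true, if_true]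
      obtain ⟨k, hk⟩ : ∃ k, PySem.List.index? p val = some k := by
        have := (PySem.List.index?_isSome_iff p val).2 hmem
        exact Option.isSome_iff_exists.mp this
      obtain ⟨hklt, hkval, -⟩ := PySem.List.getElem_of_index?_eq_some hk
      have hget : (PySem.List.pyGet? (p.map (pvRank (PySem.Set.ofList p)))
          (((PySem.List.index? p val).getD 0 : Nat) : Int)).getD 0
          = pvRank (PySem.Set.ofList p) val := by
        rw [hk]
        simp only [Option.getD_some, PySem.List.pyGet?_natCast]
        rw [List.getElem?_eq_getElem (by simpa using hklt)]
        simp [hkval]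
      rw [hget]
      have hset : PySem.Set.ofList (p ++ [val]) = PySem.Set.ofList p :=
        pvOfList_append_singleton_mem hmem
      have := ih (p ++ [val]) (by simp)
      rw [hset] at this
      have h3 : (((p ++ [val]).length : Nat) : Int) = (p.length : Int) + 1 := by simp
      rw [h3, List.map_append] at this
      simp only [List.map_cons, List.map_nil] at this
      rw [hsplit]
      exact this
    · -- new value: next counter value is its rank in the grown seen set
      simp only [List.contains_eq_mem, hmem, decide_false]
      have hset : PySem.Set.ofList (p ++ [val]) = PySem.Set.ofList p ++ [val] :=
        pvOfList_append_singleton_not_mem hmem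
      have hnotset : val ∉ PySem.Set.ofList p :=
        fun hv => hmem ((PySem.Set.mem_ofList _ _).1 hv)
      have hcancel : ((PySem.Set.ofList p).length : Int) - 1 + 1
          = ((PySem.Set.ofList p).length : Int) := by omega
      rw [if_neg (by simp), hcancel]
      have hvalrank : pvRank (PySem.Set.ofList p ++ [val]) val
          = ((PySem.Set.ofList p).length : Int) := by
        unfold pvRank
        rw [PySem.List.index?_append_singleton_self _ _ hnotset]
        simp
      have hmapnew : (p ++ [val]).map (pvRank (PySem.Set.ofList p ++ [val]))
          = p.map (pvRank (PySem.Set.ofList p)) ++ [((PySem.Set.ofList p).length : Int)] := by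
        rw [List.map_append]
        congr 1
        · apply List.map_congr_left
          intro v hv
          exact pvRank_append_of_mem _ ((PySem.Set.mem_ofList _ _).2 hv)
        · simp [hvalrank]
      have := ih (p ++ [val]) (by simp)
      rw [hset, hmapnew] at this
      have h2 : ((PySem.Set.ofList p ++ [val]).length : Int) - 1
          = ((PySem.Set.ofList p).length : Int) := by simp
      have h3 : (((p ++ [val]).length : Nat) : Int) = (p.length : Int) + 1 := by simp
      rw [h2, h3] at this
      rw [hsplit]
      exact this

-- ===== B-side lemmas =====

-- B's pass-1 invariant: after consuming `rest` behind the processed prefix `p`, the dict's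
-- items are exactly the distinct values of p ++ rest paired with their first positions
theorem pvFirst_invariant (rest : List Int) : ∀ (p : List Int) (d : PySem.Dict Int Int),
    d.items = (PySem.Set.ofList p).map (fun v => (v, pvRank p v)) →
    ((PySem.List.enumerate rest (p.length : Int)).foldl
      (fun (d : PySem.Dict Int Int) q =>
        if d.contains q.2 then d else d.insert q.2 q.1) d).items
    = (PySem.Set.ofList (p ++ rest)).map (fun v => (v, pvRank (p ++ rest) v)) := by
  induction rest with
  | nil =>
    intro p d h
    rw [PySem.List.enumerate_nil, List.foldl_nil, h, List.append_nil]
  | cons val rest' ih =>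
    intro p d h
    rw [PySem.List.enumerate_cons, List.foldl_cons]
    have hkeys : d.keys = PySem.Set.ofList p := by
      simp [PySem.Dict.keys, h, List.map_map, Function.comp_def]
    have hcont : d.contains val = decide (val ∈ p) := by
      rw [PySem.Dict.contains_eq_decide_mem_keys, hkeys]
      simp [PySem.Set.mem_ofList]
    have hsplit : p ++ val :: rest' = (p ++ [val]) ++ rest' := by simp
    have hlen : (p.length : Int) + 1 = ((p ++ [val]).length : Int) := by simp
    by_cases hmem : val ∈ p
    · rw [hcont]
      simp only [hmem, decide_true, if_true]
      have h' : d.items = (PySem.Set.ofList (p ++ [val])).map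
          (fun v => (v, pvRank (p ++ [val]) v)) := by
        rw [pvOfList_append_singleton_mem hmem, h]
        apply List.map_congr_left
        intro v hv
        rw [pvRank_append_of_mem _ ((PySem.Set.mem_ofList _ _).1 hv)]
      rw [hsplit, hlen]
      exact ih (p ++ [val]) d h'
    · rw [hcont]
      simp only [hmem, decide_false]
      have hnotset : val ∉ PySem.Set.ofList p :=
        fun hv => hmem ((PySem.Set.mem_ofList _ _).1 hv)
      have hnotcont : d.contains val = false := by rw [hcont]; simp [hmem]
      have h' : (d.insert val (p.length : Int)).items
          = (PySem.Set.ofList (p ++ [val])).map (fun v => (v, pvRank (p ++ [val]) v)) := by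
        rw [PySem.Dict.items_insert_of_not_contains _ _ hnotcont, h,
          pvOfList_append_singleton_not_mem hmem, List.map_append]
        congr 1
        · apply List.map_congr_left
          intro v hv
          rw [pvRank_append_of_mem _ ((PySem.Set.mem_ofList _ _).1 hv)]
        · have : pvRank (p ++ [val]) val = (p.length : Int) := by
            unfold pvRank
            rw [PySem.List.index?_append_singleton_self _ _ hmem]
            simp
          simp [this]
      rw [hsplit, hlen]
      exact ih (p ++ [val]) _ h'

-- the distinct values in first-appearance order have strictly increasing first positions
theorem pvRank_pairwise (l : List Int) :
    (PySem.Set.ofList l).Pairwise (fun a b => pvRank l a < pvRank l b) := by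
  induction l using List.reverseRecOn with
  | nil => simp [PySem.Set.ofList]
  | append_singleton xs x ih =>
    by_cases hmem : x ∈ xs
    · rw [pvOfList_append_singleton_mem hmem]
      refine ih.imp_of_mem ?_
      intro a b ha hb hab
      rw [pvRank_append_of_mem [x] ((PySem.Set.mem_ofList _ _).1 ha),
        pvRank_append_of_mem [x] ((PySem.Set.mem_ofList _ _).1 hb)]
      exact hab
    · rw [pvOfList_append_singleton_not_mem hmem]
      rw [List.pairwise_append]
      refine ⟨?_, by simp, ?_⟩
      · refine ih.imp_of_mem ?_
        intro a b ha hb hab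
        rw [pvRank_append_of_mem [x] ((PySem.Set.mem_ofList _ _).1 ha),
          pvRank_append_of_mem [x] ((PySem.Set.mem_ofList _ _).1 hb)]
        exact hab
      · intro a ha b hb
        rw [List.mem_singleton] at hb
        subst hb
        have ha' : a ∈ xs := (PySem.Set.mem_ofList _ _).1 ha
        rw [pvRank_append_of_mem [b] ha']
        have hb' : pvRank (xs ++ [b]) b = (xs.length : Int) := by
          unfold pvRank
          rw [PySem.List.index?_append_singleton_self _ _ hmem]
          simp
        rw [hb']
        exact pvRank_lt_length ha'

-- B computes the same labels: pvRank of the seen set, at every position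
theorem pvB_eq_labels (l : List Int) :
    labelUniqueListObjects_alt l = l.map (pvRank (PySem.Set.ofList l)) := by
  have hfirst := pvFirst_invariant l [] PySem.Dict.empty (by rfl)
  simp only [List.nil_append, List.length_nil, Nat.cast_zero] at hfirst
  unfold labelUniqueListObjects_alt
  simp only []
  set first := (PySem.List.enumerate l 0).foldl
    (fun (d : PySem.Dict Int Int) p =>
      if d.contains p.2 then d else d.insert p.2 p.1) PySem.Dict.empty with hFdef
  have hkeys : first.keys = PySem.Set.ofList l := by
    simp [PySem.Dict.keys, hfirst, List.map_map, Function.comp_def]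
  have hnodupk : first.keys.Nodup := by rw [hkeys]; exact PySem.Set.nodup_ofList l
  have hvals : first.values = (PySem.Set.ofList l).map (pvRank l) := by
    simp [PySem.Dict.values, hfirst, List.map_map, Function.comp_def]
  have hpw := pvRank_pairwise l
  have hpwv : ((PySem.Set.ofList l).map (pvRank l)).Pairwise (fun a b => a < b) := by
    rw [List.pairwise_map]
    exact hpw
  have hsorted : PySem.List.sorted first.values (fun x => x) = first.values := by
    apply PySem.List.sorted_eq_self_of_pairwise
    rw [hvals]
    exact hpwv.imp le_of_lt
  rw [hsorted, hvals]
  -- the rank dict: fresh distinct keys, so its items are the swapped enumerate pairs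
  set vlist := (PySem.Set.ofList l).map (pvRank l) with hvdef
  have hvnodup : vlist.Nodup := hpwv.imp (fun h => ne_of_lt h)
  have hrank : ((PySem.List.enumerate vlist 0).foldl
      (fun (d : PySem.Dict Int Int) p => d.insert p.2 p.1) PySem.Dict.empty).items
      = (PySem.List.enumerate vlist 0).map (fun p => (p.2, p.1)) := by
    have := PySem.Dict.items_foldl_insert_fresh (PySem.List.enumerate vlist 0)
      (fun p => p.2) (fun p => p.1) PySem.Dict.empty
      (by intro a _; rfl) (by rw [PySem.List.map_snd_enumerate]; exact hvnodup)
    simpa using this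
  set rank := (PySem.List.enumerate vlist 0).foldl
    (fun (d : PySem.Dict Int Int) p => d.insert p.2 p.1) PySem.Dict.empty with hrdef
  have hrkeys : rank.keys.Nodup := by
    have : rank.keys = vlist := by
      simp only [PySem.Dict.keys, hrank, List.map_map]
      simp [Function.comp_def, PySem.List.map_snd_enumerate]
    rw [this]
    exact hvnodup
  apply List.map_congr_left
  intro v hv
  have hvset : v ∈ PySem.Set.ofList l := (PySem.Set.mem_ofList _ _).2 hv
  -- first[v] = pvRank l v
  have hget1 : first.get? v = some (pvRank l v) :=
    PySem.Dict.get?_of_mem_items _ (by rw [hfirst]; exact List.mem_map_of_mem hvset) hnodupk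
  rw [hget1, Option.getD_some]
  -- rank[pvRank l v] = position of v in the seen set
  obtain ⟨r, hr⟩ := Option.isSome_iff_exists.mp
    ((PySem.List.index?_isSome_iff (PySem.Set.ofList l) v).2 hvset)
  obtain ⟨hrlt, hrval, -⟩ := PySem.List.getElem_of_index?_eq_some hr
  have hlt : r < vlist.length := by simpa [hvdef] using hrlt
  have hvl : pvRank l v = vlist[r]'hlt := by
    simp [hvdef, hrval]
  have hmemit : (pvRank l v, (r : Int)) ∈ (PySem.List.enumerate vlist 0).map (fun p => (p.2, p.1)) := by
    have he : (PySem.List.enumerate vlist 0)[r]'(by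
        rw [PySem.List.length_enumerate]; exact hlt) = ((0 : Int) + r, vlist[r]'hlt) :=
      PySem.List.getElem_enumerate _ _ _ _
    have hm : ((0 : Int) + r, vlist[r]'hlt) ∈ PySem.List.enumerate vlist 0 := by
      rw [← he]; exact List.getElem_mem _
    have := List.mem_map_of_mem (f := fun (p : Int × Int) => (p.2, p.1)) hm
    simpa [hvl] using this
  have hget2 : rank.get? (pvRank l v) = some (r : Int) :=
    PySem.Dict.get?_of_mem_items _ (by rw [hrank]; exact hmemit) hrkeys
  rw [hget2, Option.getD_some]
  unfold pvRank
  rw [hr]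
  simp

-- ===== VERDICT (by name: the statement is the Claim_ definition above) =====
theorem labelUniqueListObjects_spec : Claim_equal_labelUniqueListObjects := by
  intro l _
  unfold Spec_labelUniqueListObjects
  rw [pvB_eq_labels]
  unfold labelUniqueListObjects
  cases l with
  | nil => simp
  | cons x l' =>
    simp only [List.length_cons, beq_iff_eq, Nat.succ_ne_zero, if_false]
    rw [pvAGo]
    have h0 : pvAGo (x :: l') l' (0 + 1) (some 0) ([] ++ [(0 : Int)])
        = pvAGo ([x] ++ l') l' (([x].length : Nat) : Int)
          (some ((PySem.Set.ofList [x]).length - 1))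
          ([x].map (pvRank (PySem.Set.ofList [x]))) := by
      norm_num [PySem.Set.ofList, PySem.Set.add, pvRank, PySem.List.index?_cons_self]
    rw [h0, pvAGo_invariant l' [x] (by simp)]
    simp
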